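-- pv_equiv track=rewrite | github.com/mborin88/Ai-Noughts-and-Crosses | Ai Nxo/computer.py | AnalyseWinningPositions
-- ===== SOURCE A (Python) =====
-- def AnalyseWinningPositions(theGrid2, winningPositions):
--     potentialMovesDict = {'0': 0,
--                           '1': 0,
--                           '2': 0,
--                           '3': 0,
--                           '4': 0,
--                           '5': 0,
--                           '6': 0,
--                           '7': 0,
--                           '8': 0}
--
--     for i in range(len(winningPositions)):
--         for j in range(len(winningPositions[i])):
--             numAvailable = winningPositions[i][j]
--             if theGrid2[int(numAvailable)] == '':
--                 potentialMovesDict.update({numAvailable: potentialMovesDict.get(numAvailable) + 1})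
--
--     return potentialMovesDict
-- ===== SOURCE B (Python) =====
-- def AnalyseWinningPositions(theGrid2, winningPositions):
--     result = {}
--     for k in range(9):
--         c = str(k)
--         total = sum(line.count(c) for line in winningPositions)
--         result[c] = total if total and theGrid2[k] == '' else 0
--     return result
-- ===== Notes on version B (the rewrite author's own statement) =====
-- stated objective: alternative
-- what changed: B gathers instead of scatters: for each cell key '0'..'8' it computes the total occurrences of that key across all winning lines in one sum and stores it (if the cell is empty), instead of A's incremental dict updates while scanning every line element.
import Mathlib
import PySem

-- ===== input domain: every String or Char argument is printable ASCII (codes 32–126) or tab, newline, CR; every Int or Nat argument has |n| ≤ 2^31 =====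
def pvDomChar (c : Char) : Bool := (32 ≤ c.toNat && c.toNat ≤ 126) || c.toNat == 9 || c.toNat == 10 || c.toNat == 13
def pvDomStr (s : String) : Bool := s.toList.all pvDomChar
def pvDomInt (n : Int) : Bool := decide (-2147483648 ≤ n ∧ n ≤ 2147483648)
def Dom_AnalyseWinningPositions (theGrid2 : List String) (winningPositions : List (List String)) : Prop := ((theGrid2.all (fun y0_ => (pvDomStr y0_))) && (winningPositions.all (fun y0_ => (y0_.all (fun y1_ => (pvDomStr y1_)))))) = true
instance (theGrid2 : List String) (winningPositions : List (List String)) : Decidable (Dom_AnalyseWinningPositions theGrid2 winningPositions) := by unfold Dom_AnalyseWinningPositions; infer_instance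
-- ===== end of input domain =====

-- B replaces A's scatter (incrementally bumping a dict entry for every scanned line element)
-- by a gather (one occurrence count per cell key '0'..'8'); alternative decomposition, no speed claim.

-- ===== PORT A =====
-- Literal port of A's double index loop. Inside Pre_, int(numAvailable) always parses
-- ((ofStr? _).getD 0 is exact there) and the dict key is always present (getD 0 is exact there).
def AnalyseWinningPositions (theGrid2 : List String) (winningPositions : List (List String)) : List (String × Int) :=
  let init : PySem.Dict String Int :=
    PySem.Dict.ofList [("0",0),("1",0),("2",0),("3",0),("4",0),("5",0),("6",0),("7",0),("8",0)]
  let d := (PySem.List.pyRange 0 winningPositions.length 1).foldl (fun d i =>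
    (PySem.List.pyRange 0 (PySem.List.pyGetD winningPositions i []).length 1).foldl (fun d j =>
      let numAvailable := PySem.List.pyGetD (PySem.List.pyGetD winningPositions i []) j ""
      if PySem.List.pyGetD theGrid2 ((PySem.Int.ofStr? numAvailable).getD 0) "" == "" then
        d.insert numAvailable (d.getD numAvailable 0 + 1)
      else d) d) init
  d.items

-- ===== PORT B =====
-- Literal port of Source B.
def AnalyseWinningPositions_alt (theGrid2 : List String) (winningPositions : List (List String)) : List (String × Int) :=
  let d := (PySem.List.pyRange 0 9 1).foldl (fun d k =>
    let c := PySem.Int.toStr k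
    let total : Int := winningPositions.foldl (fun s line => s + (PySem.List.count line c : Int)) 0
    d.insert c (if total ≠ 0 ∧ PySem.List.pyGetD theGrid2 k "" == "" then total else 0))
    PySem.Dict.empty
  d.items

-- ===== PRECONDITION & SPEC =====
-- Pre_ is exactly the set of inputs on which Python A returns: every cell string in every
-- winning line must parse as an int (else ValueError), index into theGrid2 (else IndexError),
-- and, when that grid cell is empty, be one of the nine dict keys '0'..'8'
-- (else dict.get gives None and None + 1 raises TypeError).
def pvGoodCell (theGrid2 : List String) (c : String) : Bool :=
  match PySem.Int.ofStr? c with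
  | none => false
  | some v =>
      decide (-(theGrid2.length : Int) ≤ v ∧ v < theGrid2.length) &&
      (!(PySem.List.pyGetD theGrid2 v "" == "") || decide (c ∈ ["0","1","2","3","4","5","6","7","8"]))

def Pre_AnalyseWinningPositions (theGrid2 : List String) (winningPositions : List (List String)) : Prop :=
  ∀ line ∈ winningPositions, ∀ c ∈ line, pvGoodCell theGrid2 c = true
instance (theGrid2 : List String) (winningPositions : List (List String)) : Decidable (Pre_AnalyseWinningPositions theGrid2 winningPositions) := by
  unfold Pre_AnalyseWinningPositions; infer_instance
def pvWitness_AnalyseWinningPositions : List String × List (List String) :=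
  (["", "x", "", "o"], [[ "0", "1", "2"], ["2", "3"]])
def Spec_AnalyseWinningPositions (theGrid2 : List String) (winningPositions : List (List String)) (out : List (String × Int)) : Prop := out = AnalyseWinningPositions_alt theGrid2 winningPositions
instance (theGrid2 : List String) (winningPositions : List (List String)) (out : List (String × Int)) : Decidable (Spec_AnalyseWinningPositions theGrid2 winningPositions out) := by unfold Spec_AnalyseWinningPositions; infer_instance

-- ===== CLAIM (what is proved, stated in full; the proofs are below) =====
def Claim_equal_AnalyseWinningPositions : Prop := ∀ (theGrid2 : List String) (winningPositions : List (List String)), Dom_AnalyseWinningPositions theGrid2 winningPositions → Pre_AnalyseWinningPositions theGrid2 winningPositions → Spec_AnalyseWinningPositions theGrid2 winningPositions (AnalyseWinningPositions theGrid2 winningPositions)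

-- ===== LEMMAS AND PROOFS =====
def pvStep (g : List String) (d : PySem.Dict String Int) (c : String) : PySem.Dict String Int :=
  if PySem.List.pyGetD g ((PySem.Int.ofStr? c).getD 0) "" == "" then d.insert c (d.getD c 0 + 1) else d


lemma pvA_eq_flatten (g : List String) (wp : List (List String)) :
    AnalyseWinningPositions g wp =
    (wp.flatten.foldl (pvStep g) (PySem.Dict.mk [("0",0), ("1",0), ("2",0), ("3",0), ("4",0), ("5",0), ("6",0), ("7",0), ("8",0)])).items := by
  unfold AnalyseWinningPositions
  have hofl : (PySem.Dict.ofList [("0",0), ("1",0), ("2",0), ("3",0), ("4",0), ("5",0), ("6",0), ("7",0), ("8",0)] : PySem.Dict String Int) = PySem.Dict.mk [("0",0), ("1",0), ("2",0), ("3",0), ("4",0), ("5",0), ("6",0), ("7",0), ("8",0)] := by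
    simp [PySem.Dict.ofList, PySem.Dict.update, PySem.Dict.insert, PySem.Dict.empty, PySem.Dict.contains]
  have hinner : ∀ (d : PySem.Dict String Int) (line : List String),
      (PySem.List.pyRange 0 (line.length : Int) 1).foldl (fun d j =>
        let c := PySem.List.pyGetD line j ""
        if PySem.List.pyGetD g ((PySem.Int.ofStr? c).getD 0) "" == "" then
          d.insert c (d.getD c 0 + 1)
        else d) d = line.foldl (pvStep g) d := by
    intro d line
    exact PySem.List.foldl_pyRange_zero_pyGetD' line "" (pvStep g) d
  simp only [hofl, hinner]
  rw [PySem.List.foldl_pyRange_zero_pyGetD' wp ([] : List String)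
      (fun d line => line.foldl (pvStep g) d)]
  rw [List.foldl_flatten]

lemma pvCountFold (c : String) (wp : List (List String)) : ∀ s : Int,
    wp.foldl (fun s line => s + (PySem.List.count line c : Int)) s
      = s + (wp.flatten.count c : Int) := by
  induction wp with
  | nil => intro s; simp
  | cons line rest ih =>
      intro s
      rw [List.foldl_cons, ih]
      simp only [List.flatten_cons, List.count_append, PySem.List.count_eq]
      push_cast
      ring

set_option maxHeartbeats 2000000 in
lemma pvFoldA (g : List String) : ∀ (L : List String), (∀ c ∈ L, pvGoodCell g c = true) →
    ∀ (a0 a1 a2 a3 a4 a5 a6 a7 a8 : Int),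
    L.foldl (pvStep g) (PySem.Dict.mk [("0",a0), ("1",a1), ("2",a2), ("3",a3), ("4",a4), ("5",a5), ("6",a6), ("7",a7), ("8",a8)]) =
    PySem.Dict.mk [("0", a0 + (if PySem.List.pyGetD g 0 "" == "" then (L.count "0" : Int) else 0)), ("1", a1 + (if PySem.List.pyGetD g 1 "" == "" then (L.count "1" : Int) else 0)), ("2", a2 + (if PySem.List.pyGetD g 2 "" == "" then (L.count "2" : Int) else 0)), ("3", a3 + (if PySem.List.pyGetD g 3 "" == "" then (L.count "3" : Int) else 0)), ("4", a4 + (if PySem.List.pyGetD g 4 "" == "" then (L.count "4" : Int) else 0)), ("5", a5 + (if PySem.List.pyGetD g 5 "" == "" then (L.count "5" : Int) else 0)), ("6", a6 + (if PySem.List.pyGetD g 6 "" == "" then (L.count "6" : Int) else 0)), ("7", a7 + (if PySem.List.pyGetD g 7 "" == "" then (L.count "7" : Int) else 0)), ("8", a8 + (if PySem.List.pyGetD g 8 "" == "" then (L.count "8" : Int) else 0))] := by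
  intro L
  induction L with
  | nil => intro _ a0 a1 a2 a3 a4 a5 a6 a7 a8; simp
  | cons c L ih =>
    intro h a0 a1 a2 a3 a4 a5 a6 a7 a8
    have hc := h c (List.mem_cons_self ..)
    have hrest : ∀ x ∈ L, pvGoodCell g x = true := fun x hx => h x (List.mem_cons_of_mem _ hx)
    simp only [List.foldl_cons]
    unfold pvGoodCell at hc
    cases hv : PySem.Int.ofStr? c with
    | none => rw [hv] at hc; exact absurd hc (by simp)
    | some v =>
      rw [hv] at hc
      by_cases hemp : (PySem.List.pyGetD g v "" == "") = true
      · have hmem : c ∈ ["0","1","2","3","4","5","6","7","8"] := by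
          simp only [Bool.and_eq_true, Bool.or_eq_true, Bool.not_eq_true', decide_eq_true_eq] at hc
          rcases hc.2 with h' | h'
          · exact absurd hemp (by simp [h'])
          · exact h'
        fin_cases hmem
        · -- c = "0"
          have hveq : v = 0 := by
            rw [show PySem.Int.ofStr? "0" = some 0 from by decide] at hv
            exact (Option.some_inj.mp hv).symm
          subst hveq
          simp only [pvStep, hv, Option.getD_some, hemp, if_true]
          rw [show (PySem.Dict.mk [("0",a0), ("1",a1), ("2",a2), ("3",a3), ("4",a4), ("5",a5), ("6",a6), ("7",a7), ("8",a8)] : PySem.Dict String Int).insert "0"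
                ((PySem.Dict.mk [("0",a0), ("1",a1), ("2",a2), ("3",a3), ("4",a4), ("5",a5), ("6",a6), ("7",a7), ("8",a8)] : PySem.Dict String Int).getD "0" 0 + 1)
              = PySem.Dict.mk [("0",a0 + 1), ("1",a1), ("2",a2), ("3",a3), ("4",a4), ("5",a5), ("6",a6), ("7",a7), ("8",a8)] from by
            simp [PySem.Dict.insert, PySem.Dict.getD, PySem.Dict.get?]]
          rw [ih hrest (a0 + 1) a1 a2 a3 a4 a5 a6 a7 a8]
          clear ih h hc hrest hv
          congr 1
          simp only [List.count_cons, List.cons.injEq, Prod.mk.injEq, true_and, and_true]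
          repeat' apply And.intro
          all_goals (split <;> simp_all <;> omega)
        · -- c = "1"
          have hveq : v = 1 := by
            rw [show PySem.Int.ofStr? "1" = some 1 from by decide] at hv
            exact (Option.some_inj.mp hv).symm
          subst hveq
          simp only [pvStep, hv, Option.getD_some, hemp, if_true]
          rw [show (PySem.Dict.mk [("0",a0), ("1",a1), ("2",a2), ("3",a3), ("4",a4), ("5",a5), ("6",a6), ("7",a7), ("8",a8)] : PySem.Dict String Int).insert "1"
                ((PySem.Dict.mk [("0",a0), ("1",a1), ("2",a2), ("3",a3), ("4",a4), ("5",a5), ("6",a6), ("7",a7), ("8",a8)] : PySem.Dict String Int).getD "1" 0 + 1)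
              = PySem.Dict.mk [("0",a0), ("1",a1 + 1), ("2",a2), ("3",a3), ("4",a4), ("5",a5), ("6",a6), ("7",a7), ("8",a8)] from by
            simp [PySem.Dict.insert, PySem.Dict.getD, PySem.Dict.get?]]
          rw [ih hrest a0 (a1 + 1) a2 a3 a4 a5 a6 a7 a8]
          clear ih h hc hrest hv
          congr 1
          simp only [List.count_cons, List.cons.injEq, Prod.mk.injEq, true_and, and_true]
          repeat' apply And.intro
          all_goals (split <;> simp_all <;> omega)
        · -- c = "2"
          have hveq : v = 2 := by
            rw [show PySem.Int.ofStr? "2" = some 2 from by decide] at hv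
            exact (Option.some_inj.mp hv).symm
          subst hveq
          simp only [pvStep, hv, Option.getD_some, hemp, if_true]
          rw [show (PySem.Dict.mk [("0",a0), ("1",a1), ("2",a2), ("3",a3), ("4",a4), ("5",a5), ("6",a6), ("7",a7), ("8",a8)] : PySem.Dict String Int).insert "2"
                ((PySem.Dict.mk [("0",a0), ("1",a1), ("2",a2), ("3",a3), ("4",a4), ("5",a5), ("6",a6), ("7",a7), ("8",a8)] : PySem.Dict String Int).getD "2" 0 + 1)
              = PySem.Dict.mk [("0",a0), ("1",a1), ("2",a2 + 1), ("3",a3), ("4",a4), ("5",a5), ("6",a6), ("7",a7), ("8",a8)] from by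
            simp [PySem.Dict.insert, PySem.Dict.getD, PySem.Dict.get?]]
          rw [ih hrest a0 a1 (a2 + 1) a3 a4 a5 a6 a7 a8]
          clear ih h hc hrest hv
          congr 1
          simp only [List.count_cons, List.cons.injEq, Prod.mk.injEq, true_and, and_true]
          repeat' apply And.intro
          all_goals (split <;> simp_all <;> omega)
        · -- c = "3"
          have hveq : v = 3 := by
            rw [show PySem.Int.ofStr? "3" = some 3 from by decide] at hv
            exact (Option.some_inj.mp hv).symm
          subst hveq
          simp only [pvStep, hv, Option.getD_some, hemp, if_true]
          rw [show (PySem.Dict.mk [("0",a0), ("1",a1), ("2",a2), ("3",a3), ("4",a4), ("5",a5), ("6",a6), ("7",a7), ("8",a8)] : PySem.Dict String Int).insert "3"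
                ((PySem.Dict.mk [("0",a0), ("1",a1), ("2",a2), ("3",a3), ("4",a4), ("5",a5), ("6",a6), ("7",a7), ("8",a8)] : PySem.Dict String Int).getD "3" 0 + 1)
              = PySem.Dict.mk [("0",a0), ("1",a1), ("2",a2), ("3",a3 + 1), ("4",a4), ("5",a5), ("6",a6), ("7",a7), ("8",a8)] from by
            simp [PySem.Dict.insert, PySem.Dict.getD, PySem.Dict.get?]]
          rw [ih hrest a0 a1 a2 (a3 + 1) a4 a5 a6 a7 a8]
          clear ih h hc hrest hv
          congr 1
          simp only [List.count_cons, List.cons.injEq, Prod.mk.injEq, true_and, and_true]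
          repeat' apply And.intro
          all_goals (split <;> simp_all <;> omega)
        · -- c = "4"
          have hveq : v = 4 := by
            rw [show PySem.Int.ofStr? "4" = some 4 from by decide] at hv
            exact (Option.some_inj.mp hv).symm
          subst hveq
          simp only [pvStep, hv, Option.getD_some, hemp, if_true]
          rw [show (PySem.Dict.mk [("0",a0), ("1",a1), ("2",a2), ("3",a3), ("4",a4), ("5",a5), ("6",a6), ("7",a7), ("8",a8)] : PySem.Dict String Int).insert "4"
                ((PySem.Dict.mk [("0",a0), ("1",a1), ("2",a2), ("3",a3), ("4",a4), ("5",a5), ("6",a6), ("7",a7), ("8",a8)] : PySem.Dict String Int).getD "4" 0 + 1)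
              = PySem.Dict.mk [("0",a0), ("1",a1), ("2",a2), ("3",a3), ("4",a4 + 1), ("5",a5), ("6",a6), ("7",a7), ("8",a8)] from by
            simp [PySem.Dict.insert, PySem.Dict.getD, PySem.Dict.get?]]
          rw [ih hrest a0 a1 a2 a3 (a4 + 1) a5 a6 a7 a8]
          clear ih h hc hrest hv
          congr 1
          simp only [List.count_cons, List.cons.injEq, Prod.mk.injEq, true_and, and_true]
          repeat' apply And.intro
          all_goals (split <;> simp_all <;> omega)
        · -- c = "5"
          have hveq : v = 5 := by
            rw [show PySem.Int.ofStr? "5" = some 5 from by decide] at hv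
            exact (Option.some_inj.mp hv).symm
          subst hveq
          simp only [pvStep, hv, Option.getD_some, hemp, if_true]
          rw [show (PySem.Dict.mk [("0",a0), ("1",a1), ("2",a2), ("3",a3), ("4",a4), ("5",a5), ("6",a6), ("7",a7), ("8",a8)] : PySem.Dict String Int).insert "5"
                ((PySem.Dict.mk [("0",a0), ("1",a1), ("2",a2), ("3",a3), ("4",a4), ("5",a5), ("6",a6), ("7",a7), ("8",a8)] : PySem.Dict String Int).getD "5" 0 + 1)
              = PySem.Dict.mk [("0",a0), ("1",a1), ("2",a2), ("3",a3), ("4",a4), ("5",a5 + 1), ("6",a6), ("7",a7), ("8",a8)] from by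
            simp [PySem.Dict.insert, PySem.Dict.getD, PySem.Dict.get?]]
          rw [ih hrest a0 a1 a2 a3 a4 (a5 + 1) a6 a7 a8]
          clear ih h hc hrest hv
          congr 1
          simp only [List.count_cons, List.cons.injEq, Prod.mk.injEq, true_and, and_true]
          repeat' apply And.intro
          all_goals (split <;> simp_all <;> omega)
        · -- c = "6"
          have hveq : v = 6 := by
            rw [show PySem.Int.ofStr? "6" = some 6 from by decide] at hv
            exact (Option.some_inj.mp hv).symm
          subst hveq
          simp only [pvStep, hv, Option.getD_some, hemp, if_true]
          rw [show (PySem.Dict.mk [("0",a0), ("1",a1), ("2",a2), ("3",a3), ("4",a4), ("5",a5), ("6",a6), ("7",a7), ("8",a8)] : PySem.Dict String Int).insert "6"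
                ((PySem.Dict.mk [("0",a0), ("1",a1), ("2",a2), ("3",a3), ("4",a4), ("5",a5), ("6",a6), ("7",a7), ("8",a8)] : PySem.Dict String Int).getD "6" 0 + 1)
              = PySem.Dict.mk [("0",a0), ("1",a1), ("2",a2), ("3",a3), ("4",a4), ("5",a5), ("6",a6 + 1), ("7",a7), ("8",a8)] from by
            simp [PySem.Dict.insert, PySem.Dict.getD, PySem.Dict.get?]]
          rw [ih hrest a0 a1 a2 a3 a4 a5 (a6 + 1) a7 a8]
          clear ih h hc hrest hv
          congr 1
          simp only [List.count_cons, List.cons.injEq, Prod.mk.injEq, true_and, and_true]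
          repeat' apply And.intro
          all_goals (split <;> simp_all <;> omega)
        · -- c = "7"
          have hveq : v = 7 := by
            rw [show PySem.Int.ofStr? "7" = some 7 from by decide] at hv
            exact (Option.some_inj.mp hv).symm
          subst hveq
          simp only [pvStep, hv, Option.getD_some, hemp, if_true]
          rw [show (PySem.Dict.mk [("0",a0), ("1",a1), ("2",a2), ("3",a3), ("4",a4), ("5",a5), ("6",a6), ("7",a7), ("8",a8)] : PySem.Dict String Int).insert "7"
                ((PySem.Dict.mk [("0",a0), ("1",a1), ("2",a2), ("3",a3), ("4",a4), ("5",a5), ("6",a6), ("7",a7), ("8",a8)] : PySem.Dict String Int).getD "7" 0 + 1)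
              = PySem.Dict.mk [("0",a0), ("1",a1), ("2",a2), ("3",a3), ("4",a4), ("5",a5), ("6",a6), ("7",a7 + 1), ("8",a8)] from by
            simp [PySem.Dict.insert, PySem.Dict.getD, PySem.Dict.get?]]
          rw [ih hrest a0 a1 a2 a3 a4 a5 a6 (a7 + 1) a8]
          clear ih h hc hrest hv
          congr 1
          simp only [List.count_cons, List.cons.injEq, Prod.mk.injEq, true_and, and_true]
          repeat' apply And.intro
          all_goals (split <;> simp_all <;> omega)
        · -- c = "8"
          have hveq : v = 8 := by
            rw [show PySem.Int.ofStr? "8" = some 8 from by decide] at hv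
            exact (Option.some_inj.mp hv).symm
          subst hveq
          simp only [pvStep, hv, Option.getD_some, hemp, if_true]
          rw [show (PySem.Dict.mk [("0",a0), ("1",a1), ("2",a2), ("3",a3), ("4",a4), ("5",a5), ("6",a6), ("7",a7), ("8",a8)] : PySem.Dict String Int).insert "8"
                ((PySem.Dict.mk [("0",a0), ("1",a1), ("2",a2), ("3",a3), ("4",a4), ("5",a5), ("6",a6), ("7",a7), ("8",a8)] : PySem.Dict String Int).getD "8" 0 + 1)
              = PySem.Dict.mk [("0",a0), ("1",a1), ("2",a2), ("3",a3), ("4",a4), ("5",a5), ("6",a6), ("7",a7), ("8",a8 + 1)] from by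
            simp [PySem.Dict.insert, PySem.Dict.getD, PySem.Dict.get?]]
          rw [ih hrest a0 a1 a2 a3 a4 a5 a6 a7 (a8 + 1)]
          clear ih h hc hrest hv
          congr 1
          simp only [List.count_cons, List.cons.injEq, Prod.mk.injEq, true_and, and_true]
          repeat' apply And.intro
          all_goals (split <;> simp_all <;> omega)
      · have hstep : pvStep g (PySem.Dict.mk [("0",a0), ("1",a1), ("2",a2), ("3",a3), ("4",a4), ("5",a5), ("6",a6), ("7",a7), ("8",a8)]) c = PySem.Dict.mk [("0",a0), ("1",a1), ("2",a2), ("3",a3), ("4",a4), ("5",a5), ("6",a6), ("7",a7), ("8",a8)] := by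
          simp only [pvStep, hv, Option.getD_some]
          rw [if_neg hemp]
        rw [hstep, ih hrest a0 a1 a2 a3 a4 a5 a6 a7 a8]
        have hne : ∀ (k : String) (kv : Int), k ∈ (["0","1","2","3","4","5","6","7","8"] : List String) →
            PySem.Int.ofStr? k = some kv → (PySem.List.pyGetD g kv "" == "") = true → c ≠ k := by
          intro k kv _ hk hkv rfl
          have hkv' : kv = v := by rw [hk] at hv; exact Option.some_inj.mp hv
          exact hemp (hkv' ▸ hkv)
        clear ih h hc
        congr 1
        simp only [List.count_cons, List.cons.injEq, Prod.mk.injEq, true_and, and_true]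
        repeat' apply And.intro
        · split
          · rename_i hk
            have hcne : c ≠ "0" := hne "0" 0 (by simp) (by decide) (by simpa using hk)
            simp
            exact hcne
          · rename_i hk; simp [hk]
        · split
          · rename_i hk
            have hcne : c ≠ "1" := hne "1" 1 (by simp) (by decide) (by simpa using hk)
            simp
            exact hcne
          · rename_i hk; simp [hk]
        · split
          · rename_i hk
            have hcne : c ≠ "2" := hne "2" 2 (by simp) (by decide) (by simpa using hk)
            simp
            exact hcne
          · rename_i hk; simp [hk]
        · split
          · rename_i hk
            have hcne : c ≠ "3" := hne "3" 3 (by simp) (by decide) (by simpa using hk)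
            simp
            exact hcne
          · rename_i hk; simp [hk]
        · split
          · rename_i hk
            have hcne : c ≠ "4" := hne "4" 4 (by simp) (by decide) (by simpa using hk)
            simp
            exact hcne
          · rename_i hk; simp [hk]
        · split
          · rename_i hk
            have hcne : c ≠ "5" := hne "5" 5 (by simp) (by decide) (by simpa using hk)
            simp
            exact hcne
          · rename_i hk; simp [hk]
        · split
          · rename_i hk
            have hcne : c ≠ "6" := hne "6" 6 (by simp) (by decide) (by simpa using hk)
            simp
            exact hcne
          · rename_i hk; simp [hk]
        · split
          · rename_i hk
            have hcne : c ≠ "7" := hne "7" 7 (by simp) (by decide) (by simpa using hk)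
            simp
            exact hcne
          · rename_i hk; simp [hk]
        · split
          · rename_i hk
            have hcne : c ≠ "8" := hne "8" 8 (by simp) (by decide) (by simpa using hk)
            simp
            exact hcne
          · rename_i hk; simp [hk]


-- ===== VERDICT (by name: the statement is the Claim_ definition above) =====
theorem AnalyseWinningPositions_spec : Claim_equal_AnalyseWinningPositions := by
  intro g wp _ hpre
  unfold Spec_AnalyseWinningPositions
  have hgood : ∀ c ∈ wp.flatten, pvGoodCell g c = true := by
    intro c hc
    rcases List.mem_flatten.mp hc with ⟨line, hl, hcl⟩
    exact hpre line hl c hcl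
  rw [pvA_eq_flatten, pvFoldA g _ hgood 0 0 0 0 0 0 0 0 0]
  unfold AnalyseWinningPositions_alt
  rw [show PySem.List.pyRange 0 9 1 = [0,1,2,3,4,5,6,7,8] from by decide]
  simp only [List.foldl_cons, List.foldl_nil]
  rw [show PySem.Int.toStr 0 = "0" from by decide]
  rw [show PySem.Int.toStr 1 = "1" from by decide]
  rw [show PySem.Int.toStr 2 = "2" from by decide]
  rw [show PySem.Int.toStr 3 = "3" from by decide]
  rw [show PySem.Int.toStr 4 = "4" from by decide]
  rw [show PySem.Int.toStr 5 = "5" from by decide]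
  rw [show PySem.Int.toStr 6 = "6" from by decide]
  rw [show PySem.Int.toStr 7 = "7" from by decide]
  rw [show PySem.Int.toStr 8 = "8" from by decide]
  simp only [pvCountFold]
  simp [PySem.Dict.insert, PySem.Dict.empty, PySem.Dict.contains]
  repeat' apply And.intro
  all_goals (split_ifs <;> simp_all)
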